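-- pv_equiv track=rewrite | github.com/tejaswi0905/DSA-Python | Lcm, Gcd and primes/sieve_primes logic and code.py | hpf
-- ===== SOURCE A (Python) =====
-- import math
--
-- def hpf(n):
--     hpf_array = [i for i in range(n + 1)]
--     i = 2
--     root = math.sqrt(n)
--
--     while (i <= int(root) + 1):
--         if hpf_array[i] == i:
--             j = 2 * i
--             while (j < n + 1):
--                 hpf_array[j] = i
--                 j += i
--         i += 1
--     return hpf_array
-- ===== SOURCE B (Python) =====
-- import math
--
-- def hpf(n):
--     array = list(range(n + 1))
--     limit = int(math.sqrt(n)) + 1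
--     # primes up to limit by trial division (no divisor up to sqrt(p))
--     primes = [p for p in range(2, limit + 1)
--               if all(p % d != 0 for d in range(2, int(math.sqrt(p)) + 1))]
--     primes_desc = primes[::-1]
--     for j in range(2, n + 1):
--         for p in primes_desc:
--             if j % p == 0:
--                 array[j] = p
--                 break
--     return array
-- ===== Notes on version B (the rewrite author's own statement) =====
-- stated objective: alternative
-- what changed: Inverts the control flow: instead of sieve-marking every multiple of each prime in place, B builds the prime table up to int(math.sqrt(n)) plus one by trial division and factors each number independently by scanning that table in descending order, taking the first prime that divides it.
-- outside the precondition, e.g. on hpf(1): A raises IndexError, B returns [0, 1]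
import Mathlib
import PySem

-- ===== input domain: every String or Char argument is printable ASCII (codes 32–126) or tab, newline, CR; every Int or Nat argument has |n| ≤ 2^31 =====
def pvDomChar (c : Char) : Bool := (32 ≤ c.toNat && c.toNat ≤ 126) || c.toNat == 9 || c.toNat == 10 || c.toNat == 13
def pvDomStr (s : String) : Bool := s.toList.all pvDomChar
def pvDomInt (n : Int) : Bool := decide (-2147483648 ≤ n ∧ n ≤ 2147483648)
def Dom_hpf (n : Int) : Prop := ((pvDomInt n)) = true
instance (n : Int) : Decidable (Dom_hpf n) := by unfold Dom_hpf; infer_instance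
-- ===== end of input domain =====

-- B replaces A's sieve (marking multiples of each prime) by per-number factoring against a
-- precomputed descending prime table; alternative decomposition, not claimed faster.

-- ===== PORT A =====
-- `int(math.sqrt(n))` is ported as `Nat.sqrt n.toNat`: exact on the domain |n| ≤ 2^31,
-- where the correctly-rounded double sqrt truncates to the integer square root.
-- The two `while` loops are ported as folds over the ranges they traverse.
def hpf (n : Int) : List Int :=
  let hpfArray := PySem.List.pyRange 0 (n + 1) 1
  let root : Nat := Nat.sqrt n.toNat
  (PySem.List.pyRange 2 ((root : Int) + 2) 1).foldl
    (fun arr i =>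
      if PySem.List.pyGetD arr i 0 == i then
        (PySem.List.pyRange (2 * i) (n + 1) i).foldl
          (fun a j => PySem.List.pySetD a j i) arr
      else arr)
    hpfArray

-- ===== PORT B =====
-- `int(math.sqrt(·))` again ported as Nat.sqrt of the toNat (exact on the domain).
def hpf_alt (n : Int) : List Int :=
  let array := PySem.List.pyRange 0 (n + 1) 1
  let limit : Int := (Nat.sqrt n.toNat : Int) + 1
  let primes : List Int :=
    (PySem.List.pyRange 2 (limit + 1) 1).filter
      (fun p =>
        (PySem.List.pyRange 2 ((Nat.sqrt p.toNat : Int) + 1) 1).all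
          (fun d => PySem.Int.mod p d != 0))
  let primesDesc := primes.reverse
  (PySem.List.pyRange 2 (n + 1) 1).foldl
    (fun arr j =>
      match primesDesc.find? (fun p => PySem.Int.mod j p == 0) with
      | some p => PySem.List.pySetD arr j p
      | none => arr)
    array

-- ===== PRECONDITION & SPEC =====
-- Pre_ excludes negative n, where math.sqrt raises ValueError, and n = 1, where A's out-of-range array read raises IndexError.
def Pre_hpf (n : Int) : Prop := 0 ≤ n ∧ n ≠ 1
instance (n : Int) : Decidable (Pre_hpf n) := by unfold Pre_hpf; infer_instance
def pvWitness_hpf : Int := (12)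

def Spec_hpf (n : Int) (out : List Int) : Prop := out = hpf_alt n
instance (n : Int) (out : List Int) : Decidable (Spec_hpf n out) := by unfold Spec_hpf; infer_instance

-- ===== CLAIM (what is proved, stated in full; the proofs are below) =====
def Claim_equal_hpf : Prop := ∀ (n : Int), Dom_hpf n → Pre_hpf n → Spec_hpf n (hpf n)

-- ===== LEMMAS AND PROOFS =====

-- The common pointwise model: hpfG b k is the greatest prime p ≤ b with p ∣ k and p < k (0 if none);
-- hpfF b k is the array value: that prime if it exists, else k itself.
def hpfG (b k : Nat) : Nat := Nat.findGreatest (fun p => p.Prime ∧ p ∣ k ∧ p < k) b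
def hpfF (b k : Nat) : Int := if hpfG b k = 0 then (k : Int) else (hpfG b k : Int)

lemma getD_pyRange0 (N k : Nat) (hk : k < N + 1) :
    (PySem.List.pyRange 0 ((N : Int) + 1) 1).getD k 0 = (k : Int) := by
  have hl : (PySem.List.pyRange 0 ((N : Int) + 1) 1).length = N + 1 := by
    rw [PySem.List.length_pyRange_one]; omega
  rw [List.getD_eq_getElem _ _ (by omega : k < _), PySem.List.getElem_pyRange_one]
  simp

lemma length_pyRange0 (N : Nat) :
    (PySem.List.pyRange 0 ((N : Int) + 1) 1).length = N + 1 := by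
  rw [PySem.List.length_pyRange_one]; omega

lemma getD_set_int (arr : List Int) (m k : Nat) (c : Int) (hk : k < arr.length) :
    (arr.set m c).getD k 0 = if k = m then c else arr.getD k 0 := by
  rw [List.getD_eq_getElem _ _ (by simpa using hk), List.getElem_set,
    List.getD_eq_getElem _ _ hk]
  by_cases h : m = k
  · simp [h]
  · simp [h, Ne.symm h]

lemma foldl_setD_length (l : List Int) (c : Int) (arr : List Int) :
    (l.foldl (fun a j => PySem.List.pySetD a j c) arr).length = arr.length := by
  induction l generalizing arr with
  | nil => rfl
  | cons j t ih => simp [List.foldl, ih, PySem.List.length_pySetD]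

lemma foldl_setD_const (l : List Int) (c : Int) :
    ∀ (arr : List Int) (k : Nat), k < arr.length →
    (∀ j ∈ l, 0 ≤ j ∧ j < (arr.length : Int)) →
    (l.foldl (fun a j => PySem.List.pySetD a j c) arr).getD k 0 =
      if (k : Int) ∈ l then c else arr.getD k 0 := by
  induction l with
  | nil => intro arr k hk _; simp
  | cons j t ih =>
    intro arr k hk hb
    have hj := hb j List.mem_cons_self
    simp only [List.foldl]
    rw [ih (PySem.List.pySetD arr j c) k
        (by rw [PySem.List.length_pySetD]; exact hk)
        (by intro x hx; rw [PySem.List.length_pySetD]; exact hb x (List.mem_cons_of_mem _ hx))]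
    rw [PySem.List.pySetD_of_nonneg _ _ hj.1]
    by_cases hm : (k : Int) ∈ t
    · simp [hm]
    · rw [getD_set_int arr j.toNat k c hk]
      have hcons := List.mem_cons (a := (k : Int)) (b := j) (l := t)
      by_cases hkj : (k : Int) = j
      · have hkj' : k = j.toNat := by omega
        rw [if_pos hkj', if_pos (hcons.mpr (Or.inl hkj)), if_neg hm]
      · have hkj' : k ≠ j.toNat := by omega
        rw [if_neg hkj', if_neg (fun h => ((hcons.mp h).elim hkj hm)), if_neg hm]

lemma foldl_optSet_length (g : Int → Option Int) (l : List Int) (arr : List Int) :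
    (l.foldl (fun a j => match g j with | some v => PySem.List.pySetD a j v | none => a) arr).length
      = arr.length := by
  induction l generalizing arr with
  | nil => rfl
  | cons j t ih =>
    simp only [List.foldl]
    cases g j <;> simp [ih, PySem.List.length_pySetD]

lemma foldl_optSet_getD (g : Int → Option Int) (l : List Int) :
    ∀ (arr : List Int) (k : Nat), k < arr.length →
    (∀ j ∈ l, 0 ≤ j ∧ j < (arr.length : Int)) →
    (l.foldl (fun a j => match g j with | some v => PySem.List.pySetD a j v | none => a) arr).getD k 0 =
      if (k : Int) ∈ l then (match g (k : Int) with | some v => v | none => arr.getD k 0)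
      else arr.getD k 0 := by
  induction l with
  | nil => intro arr k hk _; simp
  | cons j t ih =>
    intro arr k hk hb
    have hj := hb j List.mem_cons_self
    have hcons := List.mem_cons (a := (k : Int)) (b := j) (l := t)
    simp only [List.foldl]
    set arr' := (match g j with | some v => PySem.List.pySetD arr j v | none => arr) with harr'
    have hlen' : arr'.length = arr.length := by
      rw [harr']; cases g j <;> simp [PySem.List.length_pySetD]
    have hstep : ∀ m : Nat, m < arr.length → arr'.getD m 0 =
        if (m : Int) = j then (match g j with | some v => v | none => arr.getD m 0)
        else arr.getD m 0 := by
      intro m hm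
      rw [harr']
      cases hg : g j with
      | none => split_ifs <;> rfl
      | some v =>
        simp only [hg]
        rw [PySem.List.pySetD_of_nonneg _ _ hj.1, getD_set_int arr j.toNat m v hm]
        by_cases hmj : (m : Int) = j
        · rw [if_pos (by omega : m = j.toNat), if_pos hmj]
        · rw [if_neg (by omega : ¬ m = j.toNat), if_neg hmj]
    rw [ih arr' k (by omega)
        (by intro x hx; rw [hlen']; exact hb x (List.mem_cons_of_mem _ hx))]
    rw [hstep k hk]
    by_cases hm : (k : Int) ∈ t
    · rw [if_pos hm, if_pos (hcons.mpr (Or.inr hm))]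
      cases hgk : g (k : Int) with
      | some v => simp [hgk]
      | none =>
        simp only [hgk]
        by_cases hkj : (k : Int) = j
        · subst hkj; simp [hgk]
        · rw [if_neg hkj]
    · rw [if_neg hm]
      by_cases hkj : (k : Int) = j
      · subst hkj
        rw [if_pos rfl, if_pos (hcons.mpr (Or.inl rfl))]
      · rw [if_neg hkj, if_neg (fun h => ((hcons.mp h).elim hkj hm))]

lemma inner_getD (N i : Nat) (hi : 2 ≤ i) (arr : List Int) (hlen : arr.length = N + 1)
    (k : Nat) (hk : k < N + 1) :
    ((PySem.List.pyRange (2 * (i : Int)) ((N : Int) + 1) (i : Int)).foldl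
        (fun a j => PySem.List.pySetD a j (i : Int)) arr).getD k 0 =
      if i ∣ k ∧ 2 * i ≤ k then (i : Int) else arr.getD k 0 := by
  have hipos : (0 : Int) < (i : Int) := by exact_mod_cast (by omega : 0 < i)
  rw [foldl_setD_const _ _ arr k (by omega)
      (by intro j hj
          rw [PySem.List.mem_pyRange_iff_of_pos hipos] at hj
          constructor
          · have : (0:Int) ≤ 2 * (i:Int) := by positivity
            omega
          · rw [hlen]; push_cast; omega)]
  have hmem : ((k : Int) ∈ PySem.List.pyRange (2 * (i : Int)) ((N : Int) + 1) (i : Int)) ↔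
      (i ∣ k ∧ 2 * i ≤ k) := by
    rw [PySem.List.mem_pyRange_iff_of_pos hipos]
    constructor
    · rintro ⟨h1, _, h3⟩
      have hdvd : (i : Int) ∣ (k : Int) := by
        have h2i : (i:Int) ∣ 2 * (i:Int) := Dvd.intro 2 (by ring)
        simpa using dvd_add h3 h2i
      exact ⟨by exact_mod_cast hdvd, by omega⟩
    · rintro ⟨h1, h2⟩
      have hdvd : (i : Int) ∣ (k : Int) := by exact_mod_cast h1
      refine ⟨by push_cast; omega, by push_cast; omega, ?_⟩
      have h2i : (i:Int) ∣ 2 * (i:Int) := Dvd.intro 2 (by ring)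
      exact dvd_sub hdvd h2i
  by_cases h : i ∣ k ∧ 2 * i ≤ k
  · rw [if_pos (hmem.mpr h), if_pos h]
  · rw [if_neg (fun hh => h (hmem.mp hh)), if_neg h]

lemma hpfF_one (k : Nat) : hpfF 1 k = (k : Int) := by
  have : hpfG 1 k = 0 := by
    unfold hpfG
    rw [show (1:Nat) = 0 + 1 from rfl, Nat.findGreatest_succ]
    simp [Nat.not_prime_one]
  simp [hpfF, this]

lemma hpfG_succ (i k : Nat) (hi : 1 ≤ i) :
    hpfG i k = if i.Prime ∧ i ∣ k ∧ i < k then i else hpfG (i - 1) k := by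
  unfold hpfG
  obtain ⟨m, rfl⟩ : ∃ m, i = m + 1 := ⟨i - 1, by omega⟩
  simp [Nat.findGreatest_succ]

lemma hpfF_self_of_prime (i : Nat) (hi : 2 ≤ i) (hp : i.Prime) : hpfF (i - 1) i = (i : Int) := by
  have : hpfG (i - 1) i = 0 := by
    unfold hpfG
    rw [Nat.findGreatest_eq_zero_iff]
    rintro p hp0 hpi ⟨hpr, hdvd, hlt⟩
    rcases (Nat.Prime.eq_one_or_self_of_dvd hp p hdvd) with h | h
    · exact Nat.Prime.ne_one hpr h
    · omega
  simp [hpfF, this]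

lemma hpfF_self_of_not_prime (i : Nat) (hi : 2 ≤ i) (hp : ¬ i.Prime) :
    hpfF (i - 1) i ≠ (i : Int) := by
  have h1 : i.minFac.Prime := Nat.minFac_prime (by omega)
  have h2 : i.minFac ∣ i := Nat.minFac_dvd i
  have h3 : i.minFac ≠ i := fun h => hp (h ▸ h1)
  have h4 : i.minFac < i := lt_of_le_of_ne (Nat.le_of_dvd (by omega) h2) h3
  have h5 : i.minFac ≤ hpfG (i - 1) i :=
    Nat.le_findGreatest (by omega) ⟨h1, h2, h4⟩
  have h6 : hpfG (i - 1) i ≤ i - 1 := Nat.findGreatest_le _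
  have h7 : 2 ≤ i.minFac := Nat.Prime.two_le h1
  intro h
  rw [hpfF, if_neg (by omega)] at h
  have : hpfG (i - 1) i = i := by exact_mod_cast h
  omega

lemma hpfF_step_prime (i k : Nat) (hi : 2 ≤ i) (hp : i.Prime) :
    (if i ∣ k ∧ 2 * i ≤ k then (i : Int) else hpfF (i - 1) k) = hpfF i k := by
  have hdvd_iff : (i ∣ k ∧ 2 * i ≤ k) ↔ (i ∣ k ∧ i < k) := by
    constructor
    · rintro ⟨h1, h2⟩; exact ⟨h1, by omega⟩
    · rintro ⟨h1, h2⟩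
      refine ⟨h1, ?_⟩
      obtain ⟨m, rfl⟩ := h1
      have hm0 : m ≠ 0 := by rintro rfl; omega
      have hm1 : m ≠ 1 := by rintro rfl; omega
      have : i * 2 ≤ i * m := Nat.mul_le_mul_left _ (by omega)
      omega
  have hg : hpfG i k = if i ∣ k ∧ 2 * i ≤ k then i else hpfG (i - 1) k := by
    rw [hpfG_succ i k (by omega)]
    by_cases h : i ∣ k ∧ i < k
    · rw [if_pos ⟨hp, h.1, h.2⟩, if_pos (hdvd_iff.mpr h)]
    · rw [if_neg (fun hh => h ⟨hh.2.1, hh.2.2⟩), if_neg (fun hh => h (hdvd_iff.mp hh))]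
  unfold hpfF
  rw [hg]
  by_cases h : i ∣ k ∧ 2 * i ≤ k
  · rw [if_pos h, if_pos h, if_neg (by omega)]
  · rw [if_neg h, if_neg h]

lemma hpfF_step_not_prime (i k : Nat) (hi : 1 ≤ i) (hp : ¬ i.Prime) :
    hpfF i k = hpfF (i - 1) k := by
  have h : hpfG i k = hpfG (i - 1) k := by
    rw [hpfG_succ i k hi, if_neg (fun hh => hp hh.1)]
  unfold hpfF
  rw [h]

lemma outer_fold (N R : Nat) (hRN : R + 1 ≤ N) :
    ∀ (d i : Nat), 2 ≤ i → i + d = R + 2 → ∀ arr : List Int, arr.length = N + 1 →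
    (∀ k < N + 1, arr.getD k 0 = hpfF (i - 1) k) →
    ((PySem.List.pyRange (i : Int) ((R : Int) + 2) 1).foldl
        (fun arr i =>
          if PySem.List.pyGetD arr i 0 == i then
            (PySem.List.pyRange (2 * i) ((N : Int) + 1) i).foldl
              (fun a j => PySem.List.pySetD a j i) arr
          else arr) arr).length = N + 1 ∧
    (∀ k < N + 1, ((PySem.List.pyRange (i : Int) ((R : Int) + 2) 1).foldl
        (fun arr i =>
          if PySem.List.pyGetD arr i 0 == i then
            (PySem.List.pyRange (2 * i) ((N : Int) + 1) i).foldl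
              (fun a j => PySem.List.pySetD a j i) arr
          else arr) arr).getD k 0 = hpfF (R + 1) k) := by
  intro d
  induction d with
  | zero =>
    intro i hi2 hid arr hlen hval
    rw [PySem.List.pyRange_one_eq_nil (by push_cast; omega)]
    refine ⟨hlen, ?_⟩
    intro k hk
    have h1 : i - 1 = R + 1 := by omega
    rw [← h1]
    exact hval k hk
  | succ d ih =>
    intro i hi2 hid arr hlen hval
    have hiR : i ≤ R + 1 := by omega
    have hiN : i < N + 1 := by omega
    rw [PySem.List.pyRange_one_cons (by push_cast; omega)]
    simp only [List.foldl]
    have hcast : ((i : Int) + 1) = (((i + 1 : Nat)) : Int) := by push_cast; ring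
    have hgetD : PySem.List.pyGetD arr (i : Int) 0 = hpfF (i - 1) i := by
      rw [PySem.List.pyGetD_natCast]
      exact hval i hiN
    by_cases hp : i.Prime
    · have hcond : (PySem.List.pyGetD arr (i : Int) 0 == (i : Int)) = true := by
        rw [hgetD, hpfF_self_of_prime i hi2 hp, beq_self_eq_true]
      rw [if_pos hcond, hcast]
      refine ih (i + 1) (by omega) (by omega) _ ?_ ?_
      · rw [foldl_setD_length, hlen]
      · intro k hk
        rw [inner_getD N i hi2 arr hlen k hk, hval k hk]
        have h1 : i + 1 - 1 = i := rfl
        rw [h1, hpfF_step_prime i k hi2 hp]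
    · have hcond : ¬ ((PySem.List.pyGetD arr (i : Int) 0 == (i : Int)) = true) := by
        simp only [beq_iff_eq, hgetD]
        exact hpfF_self_of_not_prime i hi2 hp
      rw [if_neg hcond, hcast]
      refine ih (i + 1) (by omega) (by omega) arr hlen ?_
      intro k hk
      rw [hval k hk]
      have h1 : i + 1 - 1 = i := rfl
      rw [h1]
      exact (hpfF_step_not_prime i k (by omega) hp).symm

lemma hpf_char (N : Nat) (h2 : 2 ≤ N) :
    (hpf (N : Int)).length = N + 1 ∧
    (∀ k < N + 1, (hpf (N : Int)).getD k 0 = hpfF (Nat.sqrt N + 1) k) := by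
  have hR : Nat.sqrt N + 1 ≤ N := by
    have := Nat.sqrt_lt_self (by omega : 1 < N)
    omega
  have h := outer_fold N (Nat.sqrt N) hR (Nat.sqrt N) 2 (by omega) (by omega)
      (PySem.List.pyRange 0 ((N : Int) + 1) 1) (length_pyRange0 N)
      (by intro k hk
          rw [getD_pyRange0 N k hk]
          exact (hpfF_one k).symm)
  simp only [hpf, Int.toNat_natCast]
  have hc : (((2 : Nat)) : Int) = (2 : Int) := by norm_num
  rw [hc] at h
  exact h

lemma predB_iff (q : Int) (h2 : 2 ≤ q) :
    (((PySem.List.pyRange 2 ((Nat.sqrt q.toNat : Int) + 1) 1).all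
        (fun d => PySem.Int.mod q d != 0)) = true) ↔ Nat.Prime q.toNat := by
  rw [List.all_eq_true]
  constructor
  · intro h
    rw [Nat.prime_def_le_sqrt]
    refine ⟨by omega, ?_⟩
    intro m hm2 hms hdvd
    have hd : ((m : Int)) ∈ PySem.List.pyRange 2 ((Nat.sqrt q.toNat : Int) + 1) 1 := by
      rw [PySem.List.mem_pyRange_one]
      constructor
      · exact_mod_cast hm2
      · push_cast; omega
    have hh := h _ hd
    rw [bne_iff_ne] at hh
    apply hh
    rw [PySem.Int.mod_eq_zero_iff_dvd]
    have hcast : ((m : Int)) ∣ ((q.toNat : Nat) : Int) := Int.natCast_dvd_natCast.mpr hdvd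
    rwa [Int.toNat_of_nonneg (by omega)] at hcast
  · intro hp d hd
    rw [PySem.List.mem_pyRange_one] at hd
    rw [bne_iff_ne]
    intro h0
    rw [PySem.Int.mod_eq_zero_iff_dvd] at h0
    rw [Nat.prime_def_le_sqrt] at hp
    refine hp.2 d.toNat (by omega) (by omega) ?_
    apply Int.natCast_dvd_natCast.mp
    rw [Int.toNat_of_nonneg (by omega : (0:Int) ≤ d), Int.toNat_of_nonneg (by omega : (0:Int) ≤ q)]
    exact h0

lemma find_desc_max (Q : Int → Bool) :
    ∀ (l : List Int), l.Pairwise (· > ·) → ∀ p : Int, l.find? Q = some p →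
      p ∈ l ∧ Q p = true ∧ ∀ x ∈ l, Q x = true → x ≤ p := by
  intro l
  induction l with
  | nil => intro _ p h; simp at h
  | cons a t ih =>
    intro hpw p h
    rw [List.pairwise_cons] at hpw
    rw [List.find?_cons] at h
    cases hQa : Q a with
    | true =>
      rw [hQa] at h
      simp only [Option.some.injEq] at h
      subst h
      refine ⟨List.mem_cons_self, hQa, ?_⟩
      intro x hx _
      rcases List.mem_cons.mp hx with rfl | hx
      · exact le_refl _
      · exact le_of_lt (hpw.1 x hx)
    | false =>
      rw [hQa] at h
      obtain ⟨hmem, hQp, hmax⟩ := ih hpw.2 p h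
      refine ⟨List.mem_cons_of_mem _ hmem, hQp, ?_⟩
      intro x hx hQx
      rcases List.mem_cons.mp hx with rfl | hx
      · rw [hQa] at hQx; exact absurd hQx (by simp)
      · exact hmax x hx hQx

def primesB (N : Nat) : List Int :=
  (PySem.List.pyRange 2 (((Nat.sqrt N : Int) + 1) + 1) 1).filter
    (fun p => (PySem.List.pyRange 2 ((Nat.sqrt p.toNat : Int) + 1) 1).all
      (fun d => PySem.Int.mod p d != 0))

lemma mem_primesB (N : Nat) (q : Int) :
    q ∈ primesB N ↔ 2 ≤ q ∧ q ≤ (Nat.sqrt N : Int) + 1 ∧ Nat.Prime q.toNat := by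
  unfold primesB
  rw [List.mem_filter, PySem.List.mem_pyRange_one]
  constructor
  · rintro ⟨⟨h1, h2⟩, hpred⟩
    exact ⟨h1, by omega, (predB_iff q h1).mp hpred⟩
  · rintro ⟨h1, h2, hp⟩
    exact ⟨⟨h1, by omega⟩, (predB_iff q h1).mpr hp⟩

lemma pairwise_primesB (N : Nat) : (primesB N).reverse.Pairwise (· > ·) := by
  rw [List.pairwise_reverse]
  exact List.Pairwise.filter _ (PySem.List.pairwise_lt_pyRange_one _ _)

lemma compare_val (N k : Nat) (hk2 : 2 ≤ k) :
    (match (primesB N).reverse.find? (fun p => PySem.Int.mod (k : Int) p == 0) with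
      | some p => p
      | none => (k : Int)) = hpfF (Nat.sqrt N + 1) k := by
  cases hfind : (primesB N).reverse.find? (fun p => PySem.Int.mod (k : Int) p == 0) with
  | none =>
    rw [List.find?_eq_none] at hfind
    have hG : hpfG (Nat.sqrt N + 1) k = 0 := by
      unfold hpfG
      rw [Nat.findGreatest_eq_zero_iff]
      rintro p hp0 hpb ⟨hpr, hdvd, hlt⟩
      have hmem : ((p : Int)) ∈ (primesB N).reverse := by
        rw [List.mem_reverse, mem_primesB]
        refine ⟨by exact_mod_cast hpr.two_le, by push_cast; omega, ?_⟩
        simpa using hpr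
      refine hfind _ hmem ?_
      rw [beq_iff_eq, PySem.Int.mod_eq_zero_iff_dvd]
      exact_mod_cast hdvd
    simp [hpfF, hG]
  | some p =>
    show p = hpfF (Nat.sqrt N + 1) k
    obtain ⟨hmem, hQ, hmax⟩ := find_desc_max _ _ (pairwise_primesB N) p hfind
    rw [List.mem_reverse, mem_primesB] at hmem
    obtain ⟨hp2, hpb, hppr⟩ := hmem
    rw [beq_iff_eq, PySem.Int.mod_eq_zero_iff_dvd] at hQ
    have hpk : p.toNat ∣ k := by
      apply Int.natCast_dvd_natCast.mp
      rw [Int.toNat_of_nonneg (by omega : (0:Int) ≤ p)]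
      exact_mod_cast hQ
    have hple : p.toNat ≤ k := Nat.le_of_dvd (by omega) hpk
    have hp2n : 2 ≤ p.toNat := by omega
    by_cases heq : p.toNat = k
    · have hkpr : Nat.Prime k := heq ▸ hppr
      have hG : hpfG (Nat.sqrt N + 1) k = 0 := by
        unfold hpfG
        rw [Nat.findGreatest_eq_zero_iff]
        rintro q hq0 hqb ⟨hqp, hqd, hql⟩
        rcases hkpr.eq_one_or_self_of_dvd q hqd with h | h
        · exact hqp.ne_one h
        · omega
      rw [hpfF, if_pos hG]
      omega
    · have hplt : p.toNat < k := by omega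
      have hG : hpfG (Nat.sqrt N + 1) k = p.toNat := by
        unfold hpfG
        rw [Nat.findGreatest_eq_iff]
        refine ⟨by omega, fun _ => ⟨hppr, hpk, hplt⟩, ?_⟩
        rintro q hgt hqb ⟨hqp, hqd, hql⟩
        have hmemq : ((q : Int)) ∈ (primesB N).reverse := by
          rw [List.mem_reverse, mem_primesB]
          exact ⟨by exact_mod_cast hqp.two_le, by push_cast; omega, by simpa using hqp⟩
        have hle := hmax _ hmemq
            (by rw [beq_iff_eq, PySem.Int.mod_eq_zero_iff_dvd]; exact_mod_cast hqd)
        omega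
      rw [hpfF, if_neg (by omega), hG]
      omega

lemma hpf_alt_eq (N : Nat) :
    hpf_alt (N : Int) = (PySem.List.pyRange 2 ((N : Int) + 1) 1).foldl
      (fun arr j =>
        match (primesB N).reverse.find? (fun p => PySem.Int.mod j p == 0) with
        | some p => PySem.List.pySetD arr j p
        | none => arr)
      (PySem.List.pyRange 0 ((N : Int) + 1) 1) := rfl

lemma hpf_alt_char (N : Nat) :
    (hpf_alt (N : Int)).length = N + 1 ∧
    (∀ k < N + 1, (hpf_alt (N : Int)).getD k 0 =
      if 2 ≤ k then
        (match (primesB N).reverse.find? (fun p => PySem.Int.mod (k : Int) p == 0) with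
          | some p => p
          | none => (k : Int))
      else (k : Int)) := by
  rw [hpf_alt_eq]
  constructor
  · rw [foldl_optSet_length (fun j => (primesB N).reverse.find? (fun p => PySem.Int.mod j p == 0)),
      length_pyRange0]
  · intro k hk
    have h := foldl_optSet_getD
      (fun j => (primesB N).reverse.find? (fun p => PySem.Int.mod j p == 0))
      (PySem.List.pyRange 2 ((N : Int) + 1) 1)
      (PySem.List.pyRange 0 ((N : Int) + 1) 1) k
      (by rw [length_pyRange0]; omega)
      (by intro j hj
          rw [PySem.List.mem_pyRange_one] at hj
          rw [length_pyRange0]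
          constructor
          · omega
          · push_cast; omega)
    rw [h]
    beta_reduce
    by_cases hk2 : 2 ≤ k
    · rw [if_pos (by rw [PySem.List.mem_pyRange_one]; push_cast; omega), if_pos hk2]
      cases (primesB N).reverse.find? (fun p => PySem.Int.mod (k : Int) p == 0) with
      | none => exact getD_pyRange0 N k hk
      | some p => rfl
    · rw [if_neg (by rw [PySem.List.mem_pyRange_one]; push_cast; omega), if_neg hk2]
      exact getD_pyRange0 N k hk

-- ===== VERDICT (by name: the statement is the Claim_ definition above) =====
theorem hpf_spec : Claim_equal_hpf := by
  intro n hdom hpre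
  unfold Spec_hpf
  obtain ⟨hn0, hn1⟩ := hpre
  obtain ⟨N, rfl⟩ : ∃ N : Nat, n = (N : Int) := ⟨n.toNat, (Int.toNat_of_nonneg hn0).symm⟩
  by_cases hN2 : 2 ≤ N
  · obtain ⟨hlenA, hvalA⟩ := hpf_char N hN2
    obtain ⟨hlenB, hvalB⟩ := hpf_alt_char N
    apply List.ext_getElem (by omega)
    intro i h1 h2
    have hiN : i < N + 1 := by omega
    rw [← List.getD_eq_getElem (hpf (N : Int)) 0 h1, ← List.getD_eq_getElem (hpf_alt (N : Int)) 0 h2,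
      hvalA i hiN, hvalB i hiN]
    by_cases hk2 : 2 ≤ i
    · rw [if_pos hk2]
      exact (compare_val N i hk2).symm
    · rw [if_neg hk2]
      have hG : hpfG (Nat.sqrt N + 1) i = 0 := by
        unfold hpfG
        rw [Nat.findGreatest_eq_zero_iff]
        rintro p hp0 hpb ⟨hpr, hpd, hpl⟩
        have := hpr.two_le
        omega
      simp [hpfF, hG]
  · interval_cases N
    · decide
    · exact absurd (by norm_num) hn1
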